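-- pv_equiv track=rewrite | github.com/ChristopherMcElroy/4x4x4 | board.py | diaToPoints
-- ===== SOURCE A (Python) =====
-- def diaToPoints(line):
-- 	"""
-- 	Given a line number between 48 and 75, this will return the
-- 	set of four points that make up that line, listed by x, y, and z
-- 	"""
-- 	if (48 <= line and line < 52):
-- 		l = line - 48
-- 		x = l % 4
-- 		return [[x,i,i] for i in range(4)]
-- 	if (52 <= line and line < 56):
-- 		l = line - 52
-- 		x = l % 4
-- 		return [[x,i,3-i] for i in range(4)]
-- 	if (56 <= line and line < 60):
-- 		l = line - 56
-- 		y = l % 4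
-- 		return [[i,y,i] for i in range(4)]
-- 	if (60 <= line and line < 64):
-- 		l = line - 60
-- 		y = l % 4
-- 		return [[i,y,3-i] for i in range(4)]
-- 	if (64 <= line and line < 68):
-- 		l = line - 64
-- 		z = l % 4
-- 		return [[i,i,z] for i in range(4)]
-- 	if (68 <= line and line < 72):
-- 		l = line - 68
-- 		z = l % 4
-- 		return [[i,3-i,z] for i in range(4)]
-- 	if (line == 72):
-- 		return [[i,i,i] for i in range(4)]
-- 	if (line == 73):
-- 		return [[i,i,3-i] for i in range(4)]
-- 	if (line == 74):
-- 		return [[i,3-i,i] for i in range(4)]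
-- 	if (line == 75):
-- 		return [[3-i,i,i] for i in range(4)]
-- ===== SOURCE B (Python) =====
-- def _insert3(axis, v, rest):
--     p = list(rest)
--     p.insert(axis, v)
--     return p
--
--
-- def diaToPoints(line):
--     plane = [[_insert3(axis, v, [i, 3 - i if rev else i]) for i in range(4)]
--              for axis in range(3)
--              for rev in (False, True)
--              for v in range(4)]
--     body = [[[3 - i if f else i for f in flips] for i in range(4)]
--             for flips in ([0, 0, 0], [0, 0, 1], [0, 1, 0], [1, 0, 0])]
--     table = plane + body
--     idx = line - 48
--     if 0 <= idx < len(table):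
--         return table[idx]
-- ===== Notes on version B (the rewrite author's own statement) =====
-- stated objective: alternative
-- what changed: B has no per-group dispatch at all: it generates the complete 28-line diagonal table by nested comprehensions (axis x reverse-flag x value for plane diagonals, plus flip-mask body diagonals) and simply indexes it by line-48.
-- outside the precondition, e.g. on diaToPoints(28): A returns None, B returns None; on diaToPoints(47): A returns None, B returns None; on diaToPoints(76): A returns None, B returns None
import Mathlib
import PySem

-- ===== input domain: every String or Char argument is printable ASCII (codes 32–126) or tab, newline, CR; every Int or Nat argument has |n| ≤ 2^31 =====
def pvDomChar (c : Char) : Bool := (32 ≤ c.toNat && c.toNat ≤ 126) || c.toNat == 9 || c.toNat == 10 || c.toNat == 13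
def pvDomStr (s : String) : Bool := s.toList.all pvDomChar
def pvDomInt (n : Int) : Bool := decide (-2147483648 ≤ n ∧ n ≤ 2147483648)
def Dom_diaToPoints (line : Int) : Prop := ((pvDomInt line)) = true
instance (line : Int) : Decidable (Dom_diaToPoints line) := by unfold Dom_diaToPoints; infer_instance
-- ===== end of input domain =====

-- B replaces A's ten-way dispatch by generating the whole 28-entry diagonal table and indexing it; an alternative decomposition, same cost.

-- ===== PORT A =====
-- literal transliteration: the if-chain of A, each comprehension as a map over range(4)
def diaToPoints (line : Int) : List (List Int) :=
  if 48 ≤ line ∧ line < 52 then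
    let l := line - 48
    let x := PySem.Int.mod l 4
    (PySem.List.pyRange 0 4 1).map (fun i => [x, i, i])
  else if 52 ≤ line ∧ line < 56 then
    let l := line - 52
    let x := PySem.Int.mod l 4
    (PySem.List.pyRange 0 4 1).map (fun i => [x, i, 3 - i])
  else if 56 ≤ line ∧ line < 60 then
    let l := line - 56
    let y := PySem.Int.mod l 4
    (PySem.List.pyRange 0 4 1).map (fun i => [i, y, i])
  else if 60 ≤ line ∧ line < 64 then
    let l := line - 60
    let y := PySem.Int.mod l 4
    (PySem.List.pyRange 0 4 1).map (fun i => [i, y, 3 - i])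
  else if 64 ≤ line ∧ line < 68 then
    let l := line - 64
    let z := PySem.Int.mod l 4
    (PySem.List.pyRange 0 4 1).map (fun i => [i, i, z])
  else if 68 ≤ line ∧ line < 72 then
    let l := line - 68
    let z := PySem.Int.mod l 4
    (PySem.List.pyRange 0 4 1).map (fun i => [i, 3 - i, z])
  else if line = 72 then (PySem.List.pyRange 0 4 1).map (fun i => [i, i, i])
  else if line = 73 then (PySem.List.pyRange 0 4 1).map (fun i => [i, i, 3 - i])
  else if line = 74 then (PySem.List.pyRange 0 4 1).map (fun i => [i, 3 - i, i])
  else if line = 75 then (PySem.List.pyRange 0 4 1).map (fun i => [3 - i, i, i])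
  else []  -- Python's implicit None; excluded by Pre_diaToPoints

-- ===== PORT B =====
-- helper _insert3 of Source B: copy rest and insert v at position axis
def pvInsert3 (axis v : Int) (rest : List Int) : List Int :=
  PySem.List.insert rest axis v

-- transliteration of Source B: build the full 28-line table by comprehensions, then index by line-48
def diaToPoints_alt (line : Int) : List (List Int) :=
  let plane :=
    (PySem.List.pyRange 0 3 1).flatMap (fun axis =>
      [false, true].flatMap (fun rev =>
        (PySem.List.pyRange 0 4 1).map (fun v =>
          (PySem.List.pyRange 0 4 1).map (fun i =>
            pvInsert3 axis v [i, if rev then 3 - i else i]))))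
  let body :=
    ([[0, 0, 0], [0, 0, 1], [0, 1, 0], [1, 0, 0]] : List (List Int)).map (fun flips =>
      (PySem.List.pyRange 0 4 1).map (fun i =>
        flips.map (fun f => if f ≠ 0 then 3 - i else i)))
  let table := plane ++ body
  let idx := line - 48
  if 0 ≤ idx ∧ idx < (table.length : Int) then
    PySem.List.pyGetD table idx []  -- idx in range here, default never used
  else []  -- Python's implicit None; excluded by Pre_diaToPoints

-- ===== PRECONDITION & SPEC =====
-- Pre_ excludes lines outside 48..75, where Python A returns None (no value of the declared list type).
def Pre_diaToPoints (line : Int) : Prop := 48 ≤ line ∧ line < 76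
instance (line : Int) : Decidable (Pre_diaToPoints line) := by unfold Pre_diaToPoints; infer_instance
def pvWitness_diaToPoints : Int := (50)

def Spec_diaToPoints (line : Int) (out : List (List Int)) : Prop := out = diaToPoints_alt line
instance (line : Int) (out : List (List Int)) : Decidable (Spec_diaToPoints line out) := by unfold Spec_diaToPoints; infer_instance

-- ===== CLAIM =====
def Claim_equal_diaToPoints : Prop := ∀ (line : Int), Dom_diaToPoints line → Pre_diaToPoints line → Spec_diaToPoints line (diaToPoints line)

-- ===== LEMMAS AND PROOFS =====

-- ===== VERDICT =====
theorem diaToPoints_spec : Claim_equal_diaToPoints := by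
  intro line _ hp
  obtain ⟨h1, h2⟩ := hp
  unfold Spec_diaToPoints
  interval_cases line <;> decide
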